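-- pv_equiv track=rewrite | github.com/kirarud/cbb | local-bot-ui/web/server.py | merge_graph
-- ===== SOURCE A (Python) =====
-- def merge_graph(g1, g2):
--     nodes = dict(g1.get("nodes", {}))
--     edges = dict(g1.get("edges", {}))
--     for k, v in g2.get("nodes", {}).items():
--         nodes[k] = nodes.get(k, 0) + v
--     for k, v in g2.get("edges", {}).items():
--         edges[k] = edges.get(k, 0) + v
--     return {"nodes": nodes, "edges": edges}
-- ===== SOURCE B (Python) =====
-- def merge_graph(g1, g2):
--     # Group-by aggregation: concatenate both sections' items, dedup the keys by
--     # first occurrence, then compute each key's value as the total of all its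
--     # occurrences — no accumulator dict, no incremental updates.
--     def merged(d1, d2):
--         pairs = list(d1.items()) + list(d2.items())
--         keys = []
--         for k, _ in pairs:
--             if k not in keys:
--                 keys.append(k)
--         return {k: sum(v for kk, v in pairs if kk == k) for k in keys}
--     return {"nodes": merged(g1.get("nodes", {}), g2.get("nodes", {})),
--             "edges": merged(g1.get("edges", {}), g2.get("edges", {}))}
-- ===== Notes on version B (the rewrite author's own statement) =====
-- stated objective: alternative
-- what changed: B replaces A's clone-then-mutate running dict by a group-by aggregation: it concatenates both sections' item lists, dedups the keys by first occurrence, and computes each key's value as the sum over all occurrences of that key in the concatenation, with no dict accumulator or get-lookups at all.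
import Mathlib
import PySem

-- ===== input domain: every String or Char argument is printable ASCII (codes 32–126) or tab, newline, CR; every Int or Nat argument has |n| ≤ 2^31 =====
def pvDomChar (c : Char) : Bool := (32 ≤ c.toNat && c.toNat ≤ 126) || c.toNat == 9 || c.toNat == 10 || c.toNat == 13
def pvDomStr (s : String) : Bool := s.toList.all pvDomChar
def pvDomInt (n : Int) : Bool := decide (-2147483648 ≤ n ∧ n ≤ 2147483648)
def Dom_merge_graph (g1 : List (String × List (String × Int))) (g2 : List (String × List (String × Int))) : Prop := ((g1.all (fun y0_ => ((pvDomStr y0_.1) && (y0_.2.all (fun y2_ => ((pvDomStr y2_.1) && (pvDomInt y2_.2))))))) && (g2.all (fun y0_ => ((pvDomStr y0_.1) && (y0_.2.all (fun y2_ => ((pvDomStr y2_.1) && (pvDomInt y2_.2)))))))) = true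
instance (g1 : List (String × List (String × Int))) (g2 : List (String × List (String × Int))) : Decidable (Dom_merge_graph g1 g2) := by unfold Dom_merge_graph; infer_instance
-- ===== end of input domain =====

-- B replaces A's clone-then-mutate running dict by a group-by aggregation
-- (first-occurrence key dedup, then per-key sum over the concatenated items);
-- an alternative algorithm of quadratic cost, not claimed faster.


-- ===== PORT A =====
-- nodes = dict(g1.get("nodes", {})); for k,v in g2.get("nodes",{}).items(): nodes[k] = nodes.get(k,0)+v ; likewise edges
def merge_graph (g1 : List (String × List (String × Int))) (g2 : List (String × List (String × Int))) : List (String × List (String × Int)) :=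
  let nodes0 := PySem.Dict.mk ((PySem.Dict.mk g1).getD "nodes" [])
  let edges0 := PySem.Dict.mk ((PySem.Dict.mk g1).getD "edges" [])
  let nodes := ((PySem.Dict.mk g2).getD "nodes" []).foldl (fun d p => d.insert p.1 (d.getD p.1 0 + p.2)) nodes0
  let edges := ((PySem.Dict.mk g2).getD "edges" []).foldl (fun d p => d.insert p.1 (d.getD p.1 0 + p.2)) edges0
  [("nodes", nodes.items), ("edges", edges.items)]

-- ===== PORT B =====
-- pairs = d1.items()+d2.items(); keys deduped by first occurrence;
-- {k: sum(v for kk,v in pairs if kk == k) for k in keys}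
def mergedSection (d1 d2 : List (String × Int)) : List (String × Int) :=
  let pairs := d1 ++ d2
  let keys := pairs.foldl (fun ks p => if ks.contains p.1 then ks else ks ++ [p.1]) ([] : List String)
  keys.map (fun k => (k, ((pairs.filter (fun p => p.1 == k)).map (fun p => p.2)).sum))

def merge_graph_alt (g1 : List (String × List (String × Int))) (g2 : List (String × List (String × Int))) : List (String × List (String × Int)) :=
  [("nodes", mergedSection ((PySem.Dict.mk g1).getD "nodes" []) ((PySem.Dict.mk g2).getD "nodes" [])),
   ("edges", mergedSection ((PySem.Dict.mk g1).getD "edges" []) ((PySem.Dict.mk g2).getD "edges" []))]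

-- ===== PRECONDITION & SPEC =====
-- The Python arguments are dicts of dicts; an association list whose inner key lists carry a
-- duplicate key represents no Python dict at all, so Pre_ admits exactly the dict-shaped inputs.
def Pre_merge_graph (g1 : List (String × List (String × Int))) (g2 : List (String × List (String × Int))) : Prop :=
  (∀ p ∈ g1, (p.2.map (fun q => q.1)).Nodup) ∧ (∀ p ∈ g2, (p.2.map (fun q => q.1)).Nodup)
instance (g1 : List (String × List (String × Int))) (g2 : List (String × List (String × Int))) : Decidable (Pre_merge_graph g1 g2) := by unfold Pre_merge_graph; infer_instance

def pvWitness_merge_graph : (List (String × List (String × Int))) × (List (String × List (String × Int))) :=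
  ([("nodes", [("a", 1)]), ("edges", [("a->b", 2)])], [("nodes", [("a", 3), ("b", -1)])])

def Spec_merge_graph (g1 : List (String × List (String × Int))) (g2 : List (String × List (String × Int))) (out : List (String × List (String × Int))) : Prop := out = merge_graph_alt g1 g2
instance (g1 : List (String × List (String × Int))) (g2 : List (String × List (String × Int))) (out : List (String × List (String × Int))) : Decidable (Spec_merge_graph g1 g2 out) := by unfold Spec_merge_graph; infer_instance

-- ===== CLAIM (what is proved, stated in full; the proofs are below) =====
def Claim_equal_merge_graph : Prop := ∀ (g1 : List (String × List (String × Int))) (g2 : List (String × List (String × Int))), Dom_merge_graph g1 g2 → Pre_merge_graph g1 g2 → Spec_merge_graph g1 g2 (merge_graph g1 g2)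

-- ===== LEMMAS AND PROOFS =====

-- B's first-occurrence dedup fold, for a duplicate-free chunk: append the new elements.
theorem foldl_dedup_nodup (l acc : List String) (h : l.Nodup) :
    l.foldl (fun ks x => if ks.contains x then ks else ks ++ [x]) acc
      = acc ++ l.filter (fun x => !acc.contains x) := by
  induction l generalizing acc with
  | nil => simp
  | cons x t ih =>
    simp only [List.nodup_cons] at h
    simp only [List.foldl_cons, List.filter_cons]
    by_cases hx : acc.contains x
    · have hm : x ∈ acc := by simpa using hx
      rw [if_pos hx, ih acc h.2]
      simp [hm]
    · have hx' : acc.contains x = false := by simpa using hx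
      rw [if_neg hx, ih _ h.2, List.append_assoc, List.singleton_append]
      congr 1
      rw [hx']
      simp only [Bool.not_false, if_true]
      congr 1
      apply List.filter_congr
      intro y hy
      have hyx : y ≠ x := fun e => h.1 (e ▸ hy)
      simp [hyx]

-- per-key total over one duplicate-free item list = dict lookup with default 0.
theorem sum_filter_eq_getD (d : List (String × Int)) (k : String)
    (h : (d.map (fun q => q.1)).Nodup) :
    ((d.filter (fun p => p.1 == k)).map (fun p => p.2)).sum = (PySem.Dict.mk d).getD k 0 := by
  induction d with
  | nil => simp [PySem.Dict.getD, PySem.Dict.get?]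
  | cons a t ih =>
    obtain ⟨ak, av⟩ := a
    simp only [List.map_cons, List.nodup_cons] at h
    have hmk : (PySem.Dict.mk ((ak, av) :: t)).getD k 0
        = if ak = k then av else (PySem.Dict.mk t).getD k 0 := by
      simp only [PySem.Dict.getD, PySem.Dict.get?_mk_cons]
      by_cases hk : ak = k
      · simp [hk]
      · rw [if_neg (by simp [hk]), if_neg hk]
    rw [hmk]
    simp only [List.filter_cons]
    by_cases hk : ak = k
    · have hz : (((t.filter (fun p => p.1 == k)).map (fun p => p.2)).sum : Int) = 0 := by
        have : t.filter (fun p => p.1 == k) = [] := by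
          apply List.filter_eq_nil_iff.mpr
          intro p hp
          simp only [beq_iff_eq]
          intro e
          exact h.1 (by rw [← hk] at e; exact e ▸ List.mem_map_of_mem hp)
        simp [this]
      simp [hk, hz]
    · simp only [show ((ak, av).1 == k) = false from beq_eq_false_iff_ne.mpr hk, Bool.false_eq_true, if_false, if_neg hk]
      exact ih h.2

-- A's update loop, looked up at any key: old value plus d2's value (0 where absent).
theorem foldl_insert_add_getD (d2 : List (String × Int)) (d : PySem.Dict String Int) (k : String)
    (h : (d2.map (fun q => q.1)).Nodup) :
    (d2.foldl (fun d p => d.insert p.1 (d.getD p.1 0 + p.2)) d).getD k 0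
      = d.getD k 0 + (PySem.Dict.mk d2).getD k 0 := by
  induction d2 generalizing d with
  | nil => simp [PySem.Dict.getD, PySem.Dict.get?]
  | cons a rest ih =>
    obtain ⟨ak, av⟩ := a
    simp only [List.map_cons, List.nodup_cons] at h
    simp only [List.foldl_cons]
    rw [ih _ h.2]
    have hmk : (PySem.Dict.mk ((ak, av) :: rest)).getD k 0
        = if k = ak then av else (PySem.Dict.mk rest).getD k 0 := by
      simp only [PySem.Dict.getD, PySem.Dict.get?_mk_cons]
      by_cases hk : k = ak
      · simp [hk]
      · rw [if_neg (by simpa using Ne.symm hk), if_neg hk]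
    rw [hmk, PySem.Dict.getD_insert]
    by_cases hk : k = ak
    · have hz : (PySem.Dict.mk rest).getD k 0 = 0 := by
        apply PySem.Dict.getD_of_get?_eq_none
        rw [PySem.Dict.get?_eq_none_iff_not_mem_keys, PySem.Dict.keys_mk]
        rw [hk]; exact h.1
      rw [hk] at hz
      simp [hk, hz]
    · simp [hk]

-- A's per-section loop result equals B's per-section group-by construction.
theorem section_eq (d1 d2 : List (String × Int))
    (h1 : (d1.map (fun q => q.1)).Nodup) (h2 : (d2.map (fun q => q.1)).Nodup) :
    (d2.foldl (fun d p => d.insert p.1 (d.getD p.1 0 + p.2)) (PySem.Dict.mk d1)).items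
      = mergedSection d1 d2 := by
  -- both key sequences are d1's keys followed by d2's new keys
  have hBkeys : ((d1 ++ d2).foldl (fun ks p => if ks.contains p.1 then ks else ks ++ [p.1]) ([] : List String))
      = d1.map (fun p => p.1) ++ ((d2.map (fun p => p.1)).filter (fun k => !((d1.map (fun p => p.1)).contains k))) := by
    have hfold : ∀ (c : List (String × Int)) (acc : List String),
        c.foldl (fun ks p => if ks.contains p.1 then ks else ks ++ [p.1]) acc
          = (c.map (fun p => p.1)).foldl (fun ks x => if ks.contains x then ks else ks ++ [x]) acc := by
      intro c
      induction c with
      | nil => intro acc; rfl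
      | cons a t ih => intro acc; simp only [List.foldl_cons, List.map_cons]; rw [ih]
    rw [List.foldl_append, hfold, hfold, foldl_dedup_nodup _ _ h1, foldl_dedup_nodup _ _ h2]
    simp
  have hkeys : (d2.foldl (fun d p => d.insert p.1 (d.getD p.1 0 + p.2)) (PySem.Dict.mk d1)).keys
      = d1.map (fun p => p.1) ++ ((d2.map (fun p => p.1)).filter (fun k => !((d1.map (fun p => p.1)).contains k))) := by
    rw [PySem.Dict.keys_foldl_insert_key d2 (fun p => p.1) (fun d p => d.getD p.1 0 + p.2) (PySem.Dict.mk d1)]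
    rw [PySem.Dict.keys_mk, PySem.Set.update_eq_append_filter, PySem.Set.ofList_eq_self_of_nodup _ h2]
    rfl
  have hnd : (d2.foldl (fun d p => d.insert p.1 (d.getD p.1 0 + p.2)) (PySem.Dict.mk d1)).keys.Nodup := by
    apply PySem.Dict.nodup_keys_foldl_insert_key
    rw [PySem.Dict.keys_mk]; exact h1
  rw [PySem.Dict.items_eq_map_keys _ hnd 0, hkeys, mergedSection]
  simp only [hBkeys]
  apply List.map_congr_left
  intro k _
  rw [foldl_insert_add_getD _ _ _ h2]
  congr 1
  rw [List.filter_append, List.map_append, List.sum_append,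
      sum_filter_eq_getD _ _ h1, sum_filter_eq_getD _ _ h2]

-- the inner list A and B both fetch for a section key is one of g's inner lists (or []).
theorem getD_section_nodup (g : List (String × List (String × Int))) (s : String)
    (h : ∀ p ∈ g, (p.2.map (fun q => q.1)).Nodup) :
    (((PySem.Dict.mk g).getD s []).map (fun q => q.1)).Nodup := by
  simp only [PySem.Dict.getD, PySem.Dict.get?]
  cases hf : List.find? (fun p => p.1 == s) g with
  | none => simp
  | some p =>
    simp only [Option.map_some, Option.getD_some]
    exact h p (List.mem_of_find?_eq_some hf)

-- ===== VERDICT (by name: the statement is the Claim_ definition above) =====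
theorem merge_graph_spec : Claim_equal_merge_graph := by
  intro g1 g2 _ hpre
  obtain ⟨h1, h2⟩ := hpre
  simp only [Spec_merge_graph, merge_graph, merge_graph_alt]
  rw [section_eq _ _ (getD_section_nodup g1 "nodes" h1) (getD_section_nodup g2 "nodes" h2),
      section_eq _ _ (getD_section_nodup g1 "edges" h1) (getD_section_nodup g2 "edges" h2)]
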